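-- pv_equiv track=rewrite | github.com/catanadj/taskwarrior-nautical | nautical_core.py | _split_inline_items_respecting_t_lists
-- ===== SOURCE A (Python) =====
-- def _split_inline_items_respecting_t_lists(s: str) -> list[str]:
--     """Split comma-list items, but keep commas inside '@t=HH:MM,HH:MM' values."""
--     if not s:
--         return []
--     out = []
--     buf = []
--     in_t_value = False
--     i, n = 0, len(s)
--
--     def flush():
--         tok = "".join(buf).strip()
--         if tok:
--             out.append(tok)
--         buf.clear()
--
--     while i < n:
--         ch = s[i]
--
--         if ch == "@":
--             if s[i:i+3].lower() == "@t=":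
--                 in_t_value = True
--             else:
--                 in_t_value = False
--             buf.append(ch)
--             i += 1
--             continue
--
--         if ch == ",":
--             if in_t_value:
--                 # If the comma separates times inside @t=..., keep it.
--                 # Heuristic: if the next token looks like a new list item (has '@' or starts with alpha / '-' / '(' / '|' / '&'),
--                 # treat comma as an item separator; otherwise treat it as part of the @t list (even if the token is invalid,
--                 # so @t validation can emit the correct error).
--                 j = i + 1
--                 while j < n and s[j].isspace():
--                     j += 1
--                 k = j
--                 while k < n and s[k] != ",":
--                     k += 1
--                 nxt = s[j:k].strip()
--                 if nxt and ("@" not in nxt) and (not nxt[0].isalpha()) and (nxt[0] not in "-(|&"):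
--                     buf.append(ch)
--                     i += 1
--                     continue
--                 # Otherwise comma ends this item
--                 flush()
--                 in_t_value = False
--                 i += 1
--                 continue
--
--             # Normal separator (not inside @t list)
--             flush()
--             i += 1
--             continue
--
--         buf.append(ch)
--         i += 1
--
--     flush()
--     return out
-- ===== SOURCE B (Python) =====
-- def _split_inline_items_respecting_t_lists(s: str) -> list[str]:
--     """Split comma-list items, but keep commas inside '@t=HH:MM,HH:MM' values."""
--     if not s:
--         return []
--
--     def t_flag(flag, seg):
--         # flag after scanning seg: decided by the last '@' in seg, unchanged if none
--         pos = seg.rfind('@')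
--         if pos == -1:
--             return flag
--         return seg[pos:pos + 3].lower() == '@t='
--
--     segments = s.split(',')
--     out = []
--     buf = segments[0]
--     in_t = t_flag(False, segments[0])
--     for seg in segments[1:]:
--         nxt = seg.strip()
--         if in_t and nxt and '@' not in nxt and not nxt[0].isalpha() and nxt[0] not in '-(|&':
--             # comma belongs to the @t time list: merge (seg has no '@', flag unchanged)
--             buf += ',' + seg
--         else:
--             tok = buf.strip()
--             if tok:
--                 out.append(tok)
--             buf = seg
--             in_t = t_flag(False, seg)
--     tok = buf.strip()
--     if tok:
--         out.append(tok)
--     return out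
-- ===== Notes on version B (the rewrite author's own statement) =====
-- stated objective: faster
-- what changed: B replaces A's index-based character state machine (manual i/j/k index scans with a lookahead rescan at every comma and char-by-char buffer appends) by one split on commas followed by a left-to-right segment-merging pass whose t-flag is recomputed per segment from its last at-sign.
import Mathlib
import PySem

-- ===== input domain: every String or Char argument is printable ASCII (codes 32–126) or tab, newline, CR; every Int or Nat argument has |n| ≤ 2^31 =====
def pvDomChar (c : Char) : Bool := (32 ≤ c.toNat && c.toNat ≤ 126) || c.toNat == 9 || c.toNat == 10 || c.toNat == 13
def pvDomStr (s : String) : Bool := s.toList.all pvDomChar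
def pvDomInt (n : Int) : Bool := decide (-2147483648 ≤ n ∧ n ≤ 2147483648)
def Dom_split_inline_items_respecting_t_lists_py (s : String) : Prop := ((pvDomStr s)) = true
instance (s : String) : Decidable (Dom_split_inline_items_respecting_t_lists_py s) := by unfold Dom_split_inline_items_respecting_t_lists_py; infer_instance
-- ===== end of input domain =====

-- B replaces A's index-based character state machine by a single split(',') followed by a
-- segment-merging pass (measured faster in a timing run); their equivalence is proved below.

-- shared helpers: 'tok = buf.strip(); if tok: out.append(tok)' and the next-token test
-- 'nxt and "@" not in nxt and not nxt[0].isalpha() and nxt[0] not in "-(|&"' (identical text in A and B)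
def pvFlush (out : List String) (buf : List Char) : List String :=
  let tok := PySem.Chars.strip buf
  if tok = [] then out else out ++ [String.ofList tok]

def pvNxtOk (nxt : List Char) : Bool :=
  !nxt.isEmpty && !(nxt.contains '@') && !(PySem.Chars.isalpha (nxt.headD ' ')) &&
    !(List.contains "-(|&".toList (nxt.headD ' '))

-- ===== PORT A =====
-- s[i:i+3].lower() == "@t=" at a position holding '@' (l = the remaining characters, starting at i)
def pvChk3 (l : List Char) : Bool := decide (PySem.Chars.lower (l.take 3) = "@t=".toList)

-- A's while-loop: remaining characters, buf, in_t_value, out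
def pvLoopA : List Char → List Char → Bool → List String → List String
  | [], buf, _, out => pvFlush out buf
  | ch :: rest, buf, in_t, out =>
    if ch = '@' then
      pvLoopA rest (buf ++ [ch]) (pvChk3 (ch :: rest)) out
    else if ch = ',' then
      if in_t then
        -- j skips whitespace, k runs to the next comma, nxt = s[j:k].strip()
        let nxt := PySem.Chars.strip ((rest.dropWhile PySem.Chars.isspace).takeWhile (fun c => c ≠ ','))
        if pvNxtOk nxt then
          pvLoopA rest (buf ++ [ch]) in_t out
        else
          pvLoopA rest [] false (pvFlush out buf)
      else
        pvLoopA rest [] false (pvFlush out buf)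
    else
      pvLoopA rest (buf ++ [ch]) in_t out

def split_inline_items_respecting_t_lists_py (s : String) : List String :=
  if s.toList = [] then [] else pvLoopA s.toList [] false []

-- ===== PORT B =====
-- t_flag: seg.rfind('@'); unchanged if none, else seg[pos:pos+3].lower() == '@t='.
-- pvLastAt returns seg[pos:pos+3] for pos = the LAST '@' (none if no '@').
def pvLastAt : List Char → Option (List Char)
  | [] => none
  | c :: rest =>
    match pvLastAt rest with
    | some r => some r
    | none => if c = '@' then some ((c :: rest).take 3) else none

def pvTFlag (flag : Bool) (seg : List Char) : Bool :=
  match pvLastAt seg with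
  | none => flag
  | some w => decide (PySem.Chars.lower w = "@t=".toList)

-- B's for-loop over the remaining segments (buf holds the current, possibly merged, item)
def pvGoB : Bool → List Char → List String → List (List Char) → List String
  | _, buf, out, [] => pvFlush out buf
  | in_t, buf, out, seg :: rest =>
    let nxt := PySem.Chars.strip seg
    if in_t && pvNxtOk nxt then
      pvGoB in_t (buf ++ ',' :: seg) out rest
    else
      pvGoB (pvTFlag false seg) seg (pvFlush out buf) rest

def split_inline_items_respecting_t_lists_py_alt (s : String) : List String :=
  if s.toList = [] then []
  else
    match s.toList.splitOn ',' with
    | [] => []   -- unreachable: splitOn never returns []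
    | sg :: rest => pvGoB (pvTFlag false sg) sg [] rest

-- ===== PRECONDITION & SPEC =====
def Spec_split_inline_items_respecting_t_lists_py (s : String) (out : List String) : Prop := out = split_inline_items_respecting_t_lists_py_alt s
instance (s : String) (out : List String) : Decidable (Spec_split_inline_items_respecting_t_lists_py s out) := by unfold Spec_split_inline_items_respecting_t_lists_py; infer_instance

-- ===== CLAIM (what is proved, stated in full; the proofs are below) =====
def Claim_equal_split_inline_items_respecting_t_lists_py : Prop := ∀ (s : String), Dom_split_inline_items_respecting_t_lists_py s → Spec_split_inline_items_respecting_t_lists_py s (split_inline_items_respecting_t_lists_py s)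

-- ===== LEMMAS AND PROOFS =====

-- the head segment of splitOn is comma-free and a prefix of the list up to the first comma
lemma pv_splitOn_head : ∀ (l sg : List Char) (rest : List (List Char)),
    l.splitOn ',' = sg :: rest → ',' ∉ sg ∧ (l = sg ∨ ∃ t, l = sg ++ ',' :: t) := by
  intro l
  induction l with
  | nil =>
    intro sg rest h
    rw [List.splitOn_nil] at h
    obtain ⟨rfl, rfl⟩ := List.cons.injEq .. ▸ (by injection h with h1 h2; exact ⟨h1.symm, h2.symm⟩ : sg = [] ∧ rest = [])
    simp
  | cons c l' ih =>
    intro sg rest h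
    by_cases hc : c = ','
    · subst hc
      have h' : (',' :: l').splitOn ',' = [] :: l'.splitOn ',' := by
        simp [List.splitOn, List.splitOnP_cons]
      rw [h'] at h
      injection h with h1 h2
      subst h1
      exact ⟨by simp, Or.inr ⟨l', by simp⟩⟩
    · have h' : (c :: l').splitOn ',' = (l'.splitOn ',').modifyHead (c :: ·) := by
        simp [List.splitOn, List.splitOnP_cons, hc]
      rw [h'] at h
      rcases hs : l'.splitOn ',' with _ | ⟨sg2, rest2⟩
      · exact absurd hs (List.splitOnP_ne_nil _ _)
      · rw [hs] at h
        simp [List.modifyHead] at h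
        obtain ⟨h1, h2⟩ := h
        subst h1; subst h2
        obtain ⟨hmem, hdec⟩ := ih sg2 rest2 hs
        refine ⟨by simp [hmem]; exact Ne.symm hc, ?_⟩
        rcases hdec with rfl | ⟨t, rfl⟩
        · exact Or.inl rfl
        · exact Or.inr ⟨t, by simp⟩

lemma pv_tflag_cons_ne (f : Bool) (c : Char) (sg : List Char) (h : c ≠ '@') :
    pvTFlag f (c :: sg) = pvTFlag f sg := by
  rw [pvTFlag, pvTFlag, pvLastAt]
  cases pvLastAt sg <;> simp [h]

lemma pv_chk_boundary (sg t : List Char) :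
    pvChk3 ('@' :: (sg ++ ',' :: t)) = pvChk3 ('@' :: sg) := by
  match sg with
  | [] => simp [pvChk3, PySem.Chars.lower, PySem.Chars.lowerChar, PySem.Chars.isupper]
  | [c] =>
    simp [pvChk3, PySem.Chars.lower, PySem.Chars.lowerChar, PySem.Chars.isupper]
  | c :: d :: tl => simp [pvChk3]

lemma pv_tflag_at (f : Bool) (sg l' : List Char) (h : l' = sg ∨ ∃ t, l' = sg ++ ',' :: t) :
    pvTFlag (pvChk3 ('@' :: l')) sg = pvTFlag f ('@' :: sg) := by
  unfold pvTFlag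
  rw [pvLastAt]
  cases hl : pvLastAt sg with
  | some w => simp
  | none =>
    rcases h with rfl | ⟨t, rfl⟩
    · simp [pvChk3]
    · rw [pv_chk_boundary]
      simp [pvChk3]

lemma pv_lastAt_none (sg : List Char) (h : '@' ∉ sg) : pvLastAt sg = none := by
  induction sg with
  | nil => rfl
  | cons c rest ih =>
    simp at h
    rw [pvLastAt, ih h.2]
    simp [Ne.symm h.1]

lemma mem_dropWhile {α} (p : α → Bool) (c : α) : ∀ (l : List α), c ∈ l → p c = false → c ∈ l.dropWhile p := by
  intro l
  induction l with
  | nil => simp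
  | cons a t ih =>
    intro h hp
    rw [List.dropWhile_cons]
    by_cases ha : p a = true
    · simp only [ha, if_true]
      rcases List.mem_cons.mp h with rfl | ht
      · rw [ha] at hp; cases hp
      · exact ih ht hp
    · simp [ha]; exact List.mem_cons.mp h |>.elim Or.inl (fun ht => Or.inr ht)

lemma pv_mem_strip (c : Char) (sg : List Char) (hc : PySem.Chars.isspace c = false) (h : c ∈ sg) :
    c ∈ PySem.Chars.strip sg := by
  unfold PySem.Chars.strip PySem.Chars.rstrip PySem.Chars.lstrip
  rw [List.mem_reverse]
  apply mem_dropWhile _ _ _ _ hc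
  rw [List.mem_reverse]
  exact mem_dropWhile _ _ _ h hc


lemma pv_strip_dropWhile (sg : List Char) :
    PySem.Chars.strip (sg.dropWhile PySem.Chars.isspace) = PySem.Chars.strip sg := by
  unfold PySem.Chars.strip PySem.Chars.lstrip
  rw [List.dropWhile_idempotent]

lemma pv_strip_allspace (sg : List Char) (h : ∀ c ∈ sg, PySem.Chars.isspace c = true) :
    PySem.Chars.strip sg = [] := by
  unfold PySem.Chars.strip PySem.Chars.rstrip PySem.Chars.lstrip
  rw [List.dropWhile_eq_nil_iff.mpr h]
  simp

lemma pv_strip_nil : PySem.Chars.strip [] = [] := rfl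

lemma pv_nxt_eq (sg tail : List Char) (hc : ',' ∉ sg) (ht : tail = [] ∨ ∃ t, tail = ',' :: t) :
    PySem.Chars.strip (((sg ++ tail).dropWhile PySem.Chars.isspace).takeWhile (fun c => c ≠ ','))
      = PySem.Chars.strip sg := by
  by_cases hd : (sg.dropWhile PySem.Chars.isspace).isEmpty = true
  · -- sg is all whitespace
    have hall : ∀ c ∈ sg, PySem.Chars.isspace c = true :=
      List.dropWhile_eq_nil_iff.mp (List.isEmpty_iff.mp hd)
    rw [List.dropWhile_append, if_pos hd, pv_strip_allspace sg hall]
    rcases ht with rfl | ⟨t, rfl⟩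
    · simp [pv_strip_nil]
    · have h2 : PySem.Chars.isspace ',' = false := by decide
      rw [List.dropWhile_cons, h2]
      simp [pv_strip_nil]
  · rw [List.dropWhile_append, if_neg hd]
    set ds := sg.dropWhile PySem.Chars.isspace with hds
    have hdsc : ∀ c ∈ ds, (fun c => decide (c ≠ ',')) c = true := by
      intro c hm
      have : c ∈ sg := (List.dropWhile_sublist _).mem hm
      simp
      exact fun hqq => hc (hqq ▸ this)
    have hlen : (ds.takeWhile (fun c => decide (c ≠ ','))).length = ds.length := by
      rw [List.takeWhile_eq_self_iff.mpr hdsc]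
    rw [List.takeWhile_append, if_pos hlen]
    rcases ht with rfl | ⟨t, rfl⟩
    · simp only [List.takeWhile_nil, List.append_nil]
      exact pv_strip_dropWhile sg
    · have h3 : List.takeWhile (fun c => decide (c ≠ ',')) (',' :: t) = [] := by simp
      rw [h3, List.append_nil]
      exact pv_strip_dropWhile sg

lemma pv_main : ∀ (l buf : List Char) (in_t : Bool) (out : List String)
    (sg : List Char) (rest : List (List Char)),
    l.splitOn ',' = sg :: rest →
    pvLoopA l buf in_t out = pvGoB (pvTFlag in_t sg) (buf ++ sg) out rest := by
  intro l
  induction l with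
  | nil =>
    intro buf in_t out sg rest h
    rw [List.splitOn_nil] at h
    injection h with h1 h2; subst h1; subst h2
    simp [pvLoopA, pvGoB]
  | cons c l' ih =>
    intro buf in_t out sg rest h
    rcases hs : l'.splitOn ',' with _ | ⟨sg2, rest2⟩
    · exact absurd hs (List.splitOnP_ne_nil _ _)
    obtain ⟨hmem2, hdec2⟩ := pv_splitOn_head l' sg2 rest2 hs
    by_cases hc : c = ','
    · subst hc
      have h' : (',' :: l').splitOn ',' = [] :: l'.splitOn ',' := by
        simp [List.splitOn, List.splitOnP_cons]
      rw [h', hs] at h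
      injection h with h1 h2; subst h1; subst h2
      have hnxt : PySem.Chars.strip ((l'.dropWhile PySem.Chars.isspace).takeWhile (fun c => c ≠ ','))
          = PySem.Chars.strip sg2 := by
        rcases hdec2 with h0 | ⟨t, h0⟩
        · rw [h0]; simpa using pv_nxt_eq sg2 [] hmem2 (Or.inl rfl)
        · rw [h0]; exact pv_nxt_eq sg2 (',' :: t) hmem2 (Or.inr ⟨t, rfl⟩)
      have htf : pvTFlag in_t ([] : List Char) = in_t := rfl
      rw [htf, pvGoB, pvLoopA]
      simp only [List.append_nil, hnxt]
      cases in_t with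
      | false =>
        simp only [Bool.false_and, if_neg (by decide : ¬ (',' = '@')),
          Bool.false_eq_true, if_false, if_true]
        simpa using ih [] false (pvFlush out buf) sg2 rest2 hs
      | true =>
        simp only [Bool.true_and, if_neg (by decide : ¬ (',' = '@')), if_true]
        by_cases hok : pvNxtOk (PySem.Chars.strip sg2) = true
        · rw [if_pos hok, if_pos hok]
          have hat : '@' ∉ sg2 := by
            intro hmem
            have hin := pv_mem_strip '@' sg2 (by decide) hmem
            rw [pvNxtOk] at hok
            simp only [Bool.and_eq_true, Bool.not_eq_true'] at hok
            have hnc : (PySem.Chars.strip sg2).contains '@' = false := hok.1.1.2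
            exact absurd hin (by simpa using hnc)
          have : pvTFlag true sg2 = true := by rw [pvTFlag, pv_lastAt_none sg2 hat]
          rw [ih (buf ++ [',']) true out sg2 rest2 hs, this]
          simp
        · rw [if_neg hok, if_neg hok]
          simpa using ih [] false (pvFlush out buf) sg2 rest2 hs
    · have h' : (c :: l').splitOn ',' = (c :: sg2) :: rest2 := by
        simp [List.splitOn, List.splitOnP_cons, hc]
        rw [show l'.splitOnP (fun x => x == ',') = sg2 :: rest2 from hs]
        simp [List.modifyHead]
      rw [h'] at h
      injection h with h1 h2; subst h1; subst h2
      by_cases hat : c = '@'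
      · subst hat
        rw [pvLoopA, if_pos rfl]
        rw [ih (buf ++ ['@']) (pvChk3 ('@' :: l')) out sg2 rest2 hs]
        rw [pv_tflag_at in_t sg2 l' hdec2]
        simp
      · rw [pvLoopA, if_neg hat, if_neg hc]
        rw [ih (buf ++ [c]) in_t out sg2 rest2 hs]
        rw [pv_tflag_cons_ne in_t c sg2 hat]
        simp

-- ===== VERDICT (by name: the statement is the Claim_ definition above) =====
theorem split_inline_items_respecting_t_lists_py_spec : Claim_equal_split_inline_items_respecting_t_lists_py := by
  intro s _
  unfold Spec_split_inline_items_respecting_t_lists_py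
  unfold split_inline_items_respecting_t_lists_py split_inline_items_respecting_t_lists_py_alt
  by_cases h : s.toList = []
  · simp [h]
  · rcases hs : s.toList.splitOn ',' with _ | ⟨sg, rest⟩
    · exact absurd hs (List.splitOnP_ne_nil _ _)
    · simp only [h, if_false]
      simpa using pv_main s.toList [] false [] sg rest hs
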